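-- pv_equiv track=rewrite | github.com/NatesVibeCode/Praxis | Code&DBs/Workflow/runtime/work_item_clustering.py | _tag_values
-- ===== SOURCE A (Python) =====
-- from collections.abc import Mapping, Sequence
--
-- def _tag_values(tags: Sequence[str]) -> dict[str, list[str]]:
--     values: dict[str, list[str]] = {}
--     for raw_tag in tags:
--         key, sep, value = raw_tag.partition(":")
--         if not sep:
--             continue
--         normalized_key = key.strip().lower()
--         normalized_value = value.strip()
--         if normalized_key and normalized_value:
--             values.setdefault(normalized_key, []).append(normalized_value)
--     return values
-- ===== SOURCE B (Python) =====
-- def _tag_values(tags):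
--     # Two-pass: flatten into normalized (key, value) pairs, then group by
--     # first-occurrence key order with comprehensions.
--     pairs = [(k.strip().lower(), v.strip())
--              for k, _, v in (t.partition(":") for t in tags)]
--     pairs = [(k, v) for k, v in pairs if k and v]
--     keys = dict.fromkeys(k for k, _ in pairs)
--     return {k: [v for q, v in pairs if q == k] for k in keys}
-- ===== Notes on version B (the rewrite author's own statement) =====
-- stated objective: simpler
-- what changed: Replaces A's single loop that mutates a dict via setdefault/append with a two-pass comprehension pipeline: flatten tags into normalized (key,value) pairs, then group values per first-occurrence key with dict.fromkeys and a dict comprehension.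
import Mathlib
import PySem

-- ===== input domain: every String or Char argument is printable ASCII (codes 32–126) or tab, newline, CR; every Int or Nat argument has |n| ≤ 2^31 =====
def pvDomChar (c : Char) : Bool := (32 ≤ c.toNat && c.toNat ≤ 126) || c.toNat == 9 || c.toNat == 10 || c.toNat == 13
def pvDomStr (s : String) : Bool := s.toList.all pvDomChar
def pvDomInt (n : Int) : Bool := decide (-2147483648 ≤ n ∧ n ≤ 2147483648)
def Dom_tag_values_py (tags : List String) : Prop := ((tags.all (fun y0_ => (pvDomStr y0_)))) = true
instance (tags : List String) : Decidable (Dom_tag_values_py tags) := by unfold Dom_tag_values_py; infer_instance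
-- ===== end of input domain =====

-- B groups a flat list of normalized pairs with comprehensions instead of a dict-building loop; objective: simpler (no speed claim).

-- s.partition(":") for the one-char separator ":", ported by hand via PySem.Str.find
-- (exact: first occurrence; if absent, (s, "", "")).
def pyPartitionColon (s : String) : String × String × String :=
  if PySem.Str.find s ":" < 0 then (s, "", "")
  else (String.ofList (s.toList.take (PySem.Str.find s ":").toNat), ":",
        String.ofList (s.toList.drop ((PySem.Str.find s ":").toNat + 1)))

-- ===== PORT A =====
def tag_values_py (tags : List String) : List (String × List String) :=
  (tags.foldl (fun (values : PySem.Dict String (List String)) raw_tag =>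
      let p := pyPartitionColon raw_tag
      if p.2.1 == "" then values
      else
        let normalized_key := PySem.Str.lower (PySem.Str.strip p.1)
        let normalized_value := PySem.Str.strip p.2.2
        if normalized_key ≠ "" ∧ normalized_value ≠ "" then
          -- values.setdefault(k, []).append(v): in-place append at key k, default []
          values.modify normalized_key [] (· ++ [normalized_value])
        else values)
    PySem.Dict.empty).items

-- ===== PORT B =====
def pvPairs (tags : List String) : List (String × String) :=
  (tags.map (fun t =>
      let p := pyPartitionColon t
      (PySem.Str.lower (PySem.Str.strip p.1), PySem.Str.strip p.2.2))).filter
    (fun q => !(q.1 == "") && !(q.2 == ""))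

def tag_values_py_alt (tags : List String) : List (String × List String) :=
  let pairs := pvPairs tags
  let keys := PySem.List.dedup (pairs.map (·.1))
  keys.map (fun k => (k, (pairs.filter (fun q => q.1 == k)).map (·.2)))

-- ===== PRECONDITION & SPEC =====
def Spec_tag_values_py (tags : List String) (out : List (String × List String)) : Prop := out = tag_values_py_alt tags
instance (tags : List String) (out : List (String × List String)) : Decidable (Spec_tag_values_py tags out) := by unfold Spec_tag_values_py; infer_instance

-- ===== CLAIM (what is proved, stated in full; the proofs are below) =====
def Claim_equal_tag_values_py : Prop := ∀ (tags : List String), Dom_tag_values_py tags → Spec_tag_values_py tags (tag_values_py tags)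

-- ===== LEMMAS AND PROOFS =====

-- the loop body of A's port, named for the proofs
def pvStepA (values : PySem.Dict String (List String)) (raw_tag : String) :
    PySem.Dict String (List String) :=
  let p := pyPartitionColon raw_tag
  if p.2.1 == "" then values
  else
    let normalized_key := PySem.Str.lower (PySem.Str.strip p.1)
    let normalized_value := PySem.Str.strip p.2.2
    if normalized_key ≠ "" ∧ normalized_value ≠ "" then
      values.modify normalized_key [] (· ++ [normalized_value])
    else values

theorem pv_tag_values_eq_foldl_stepA (tags : List String) :
    tag_values_py tags = (tags.foldl pvStepA PySem.Dict.empty).items := rfl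

-- one tag's contribution to the flat pair list
theorem pv_pairs_cons (t : String) (ts : List String) :
    pvPairs (t :: ts) =
      (if !(PySem.Str.lower (PySem.Str.strip (pyPartitionColon t).1) == "") &&
          !(PySem.Str.strip (pyPartitionColon t).2.2 == "") then
        [(PySem.Str.lower (PySem.Str.strip (pyPartitionColon t).1),
          PySem.Str.strip (pyPartitionColon t).2.2)] else []) ++ pvPairs ts := by
  simp only [pvPairs, List.map_cons, List.filter_cons]
  split <;> rfl

-- when ":" is absent the after-part is empty
theorem pv_after_of_no_sep (t : String) (h : ((pyPartitionColon t).2.1 == "") = true) :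
    (pyPartitionColon t).2.2 = "" := by
  unfold pyPartitionColon at h ⊢
  split at h
  · simp_all
  · simp at h

-- A's loop over tags equals the grouping fold over the flat pair list.
theorem pv_fold_eq (tags : List String) (d : PySem.Dict String (List String)) :
    tags.foldl pvStepA d
      = (pvPairs tags).foldl (fun d q => d.modify q.1 [] (· ++ [q.2])) d := by
  induction tags generalizing d with
  | nil => rfl
  | cons t ts ih =>
    have hhead : pvStepA d t =
        ((if !(PySem.Str.lower (PySem.Str.strip (pyPartitionColon t).1) == "") &&
            !(PySem.Str.strip (pyPartitionColon t).2.2 == "") then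
          [(PySem.Str.lower (PySem.Str.strip (pyPartitionColon t).1),
            PySem.Str.strip (pyPartitionColon t).2.2)] else ([] : List (String × String))).foldl
          (fun d q => d.modify q.1 [] (· ++ [q.2])) d) := by
      by_cases hsep : ((pyPartitionColon t).2.1 == "") = true
      · have hafter := pv_after_of_no_sep t hsep
        have hstrip : PySem.Str.strip (pyPartitionColon t).2.2 = "" := by rw [hafter]; decide
        rw [pvStepA, if_pos hsep, hstrip]
        simp
      · rw [pvStepA, if_neg hsep]
        by_cases hk : PySem.Str.lower (PySem.Str.strip (pyPartitionColon t).1) ≠ "" ∧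
            PySem.Str.strip (pyPartitionColon t).2.2 ≠ ""
        · rw [if_pos hk, if_pos (by simp [hk.1, hk.2]), List.foldl_cons, List.foldl_nil]
        · rw [if_neg hk, if_neg (by rcases not_and_or.mp hk with h | h <;> simp_all),
            List.foldl_nil]
    rw [List.foldl_cons, ih, pv_pairs_cons, List.foldl_append, hhead]

-- ===== VERDICT (by name: the statement is the Claim_ definition above) =====
theorem tag_values_py_spec : Claim_equal_tag_values_py := by
  intro tags _
  show tag_values_py tags = tag_values_py_alt tags
  rw [pv_tag_values_eq_foldl_stepA, pv_fold_eq]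
  have hnd : ((pvPairs tags).foldl
      (fun d q => d.modify q.1 [] (· ++ [q.2])) PySem.Dict.empty).keys.Nodup :=
    PySem.Dict.nodup_keys_foldl_modify_key _ _ _ _ _ PySem.Dict.nodup_keys_empty
  rw [PySem.Dict.items_eq_map_keys _ hnd []]
  have hkeys : ((pvPairs tags).foldl
      (fun d q => d.modify q.1 [] (· ++ [q.2])) PySem.Dict.empty).keys
      = PySem.List.dedup ((pvPairs tags).map (·.1)) := by
    rw [PySem.Dict.keys_foldl_modify_key]
    simp [PySem.Set.update_nil_left]
  rw [hkeys]
  unfold tag_values_py_alt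
  apply List.map_congr_left
  intro k _
  have h := PySem.Dict.getD_foldl_modify_append (l := pvPairs tags)
    (d := PySem.Dict.empty) (c := k)
  simp only [PySem.Dict.getD_empty, List.nil_append] at h
  rw [h]
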